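-- pv_equiv track=rewrite | github.com/msbaek/git-log-doc | src/diff_visualizer.py | _prepare_side_by_side_diff
-- ===== SOURCE A (Python) =====
-- def _prepare_side_by_side_diff(diff_content):
--     """Prepare diff content for side-by-side display"""
--     left_lines = []  # Original (deleted) content
--     right_lines = [] # New (added) content
--
--     i = 0
--     while i < len(diff_content):
--         line = diff_content[i]
--
--         if line['type'] == 'hunk':
--             # Add hunk header to both sides
--             left_lines.append(line)
--             right_lines.append(line)
--         elif line['type'] == 'delete':
--             # Collect consecutive delete lines
--             delete_block = []
--             while i < len(diff_content) and diff_content[i]['type'] == 'delete':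
--                 delete_block.append(diff_content[i])
--                 i += 1
--
--             # Check if followed by add lines
--             add_block = []
--             while i < len(diff_content) and diff_content[i]['type'] == 'add':
--                 add_block.append(diff_content[i])
--                 i += 1
--
--             # Pair them up
--             max_len = max(len(delete_block), len(add_block))
--             for j in range(max_len):
--                 if j < len(delete_block):
--                     left_lines.append(delete_block[j])
--                 else:
--                     left_lines.append({'type': 'empty', 'content': ''})
--
--                 if j < len(add_block):
--                     right_lines.append(add_block[j])
--                 else:
--                     right_lines.append({'type': 'empty', 'content': ''})
--
--             i -= 1  # Adjust because we've already processed adds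
--         elif line['type'] == 'add':
--             # Standalone add (no preceding delete)
--             left_lines.append({'type': 'empty', 'content': ''})
--             right_lines.append(line)
--         else:
--             # Context lines appear on both sides
--             left_lines.append({'type': 'context', 'content': line.get('content', '')})
--             right_lines.append({'type': 'context', 'content': line.get('content', '')})
--
--         i += 1
--
--     return left_lines, right_lines
-- ===== SOURCE B (Python) =====
-- def _prepare_side_by_side_diff(diff_content):
--     """Two-pass rewrite: first group the diff into segment descriptors, then render them."""
--     n = len(diff_content)
--     segments = []
--     i = 0
--     while i < n:
--         line = diff_content[i]
--         if line['type'] == 'delete':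
--             j = i
--             while j < n and diff_content[j]['type'] == 'delete':
--                 j += 1
--             k = j
--             while k < n and diff_content[k]['type'] == 'add':
--                 k += 1
--             segments.append(('pair', diff_content[i:j], diff_content[j:k]))
--             i = k
--         else:
--             segments.append(('single', line['type'], line))
--             i += 1
--
--     left, right = [], []
--     empty = lambda: {'type': 'empty', 'content': ''}
--     for seg in segments:
--         if seg[0] == 'pair':
--             _, dels, adds = seg
--             pad = max(len(dels), len(adds))
--             left += dels + [empty() for _ in range(pad - len(dels))]
--             right += adds + [empty() for _ in range(pad - len(adds))]
--         else:
--             _, t, line = seg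
--             if t == 'hunk':
--                 left.append(line)
--                 right.append(line)
--             elif t == 'add':
--                 left.append(empty())
--                 right.append(line)
--             else:
--                 ctx = {'type': 'context', 'content': line.get('content', '')}
--                 left.append(ctx)
--                 right.append(dict(ctx))
--     return left, right
-- ===== Notes on version B (the rewrite author's own statement) =====
-- stated objective: alternative
-- what changed: A's single index-driven while loop with an i-adjustment hack and an interleaved range(max_len) pairing loop is replaced by two passes: build a list of segment descriptors (pair/single) first, then render each segment onto the columns by list concatenation with replicated empty-row padding.
import Mathlib
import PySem

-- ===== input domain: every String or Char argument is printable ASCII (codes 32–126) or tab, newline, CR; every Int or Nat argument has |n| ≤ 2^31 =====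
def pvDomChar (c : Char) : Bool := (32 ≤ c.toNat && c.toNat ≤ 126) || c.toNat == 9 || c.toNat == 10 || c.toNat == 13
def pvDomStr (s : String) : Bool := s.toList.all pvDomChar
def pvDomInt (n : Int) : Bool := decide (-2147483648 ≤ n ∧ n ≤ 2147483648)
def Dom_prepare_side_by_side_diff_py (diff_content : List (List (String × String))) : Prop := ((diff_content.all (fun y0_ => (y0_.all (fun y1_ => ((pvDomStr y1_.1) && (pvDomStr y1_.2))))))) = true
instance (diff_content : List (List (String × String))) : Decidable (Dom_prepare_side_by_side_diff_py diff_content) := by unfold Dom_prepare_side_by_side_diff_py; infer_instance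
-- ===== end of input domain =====

-- B regroups A's single index loop into two passes (segment descriptors, then rendering); the proof shows both emit the same rows.

-- ===== PORT A =====
-- line['type'] (first-match lookup in the assoc list; Pre_ guarantees the key is present)
def pvType (line : List (String × String)) : String := (List.lookup "type" line).getD ""

def pvEmptyRow : List (String × String) := [("type", "empty"), ("content", "")]

-- {'type': 'context', 'content': line.get('content', '')}
def pvCtxRow (line : List (String × String)) : List (String × String) :=
  [("type", "context"), ("content", (List.lookup "content" line).getD "")]

-- the inner 'while … type == t: block.append(…); i += 1' loops: returns (block, remaining lines)
def pvCollect (t : String) : List (List (String × String)) →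
    List (List (String × String)) × List (List (String × String))
  | [] => ([], [])
  | l :: ls =>
    if pvType l == t then
      let (b, r) := pvCollect t ls
      (l :: b, r)
    else ([], l :: ls)

-- 'for j in range(max_len): …' appending to left/right
def pvPairLoop (db ab : List (List (String × String)))
    (L R : List (List (String × String))) :
    List (List (String × String)) × List (List (String × String)) :=
  (List.range (max db.length ab.length)).foldl
    (fun acc j =>
      ((if j < db.length then acc.1 ++ [db.getD j []] else acc.1 ++ [pvEmptyRow]),
       (if j < ab.length then acc.2 ++ [ab.getD j []] else acc.2 ++ [pvEmptyRow])))
    (L, R)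

theorem pvCollect_rest_le (t : String) (xs : List (List (String × String))) :
    (pvCollect t xs).2.length ≤ xs.length := by
  induction xs with
  | nil => simp [pvCollect]
  | cons l ls ih =>
    simp only [pvCollect]
    split
    · simpa using Nat.le_succ_of_le ih
    · simp

theorem pvCollect_cons_le (t : String) (x : List (String × String))
    (xs : List (List (String × String))) (h : (pvType x == t) = true) :
    (pvCollect t (x :: xs)).2.length ≤ xs.length := by
  simpa [pvCollect, h] using pvCollect_rest_le t xs

-- the outer 'while i < len(diff_content)' loop of A, carrying left_lines/right_lines
def pvLoopA : List (List (String × String)) →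
    List (List (String × String)) → List (List (String × String)) →
    List (List (String × String)) × List (List (String × String))
  | [], L, R => (L, R)
  | line :: rest, L, R =>
    if pvType line == "hunk" then
      pvLoopA rest (L ++ [line]) (R ++ [line])
    else if h : pvType line == "delete" then
      let db := (pvCollect "delete" (line :: rest)).1
      let r1 := (pvCollect "delete" (line :: rest)).2
      let ab := (pvCollect "add" r1).1
      let r2 := (pvCollect "add" r1).2
      let LR := pvPairLoop db ab L R
      pvLoopA r2 LR.1 LR.2
    else if pvType line == "add" then
      pvLoopA rest (L ++ [pvEmptyRow]) (R ++ [line])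
    else
      pvLoopA rest (L ++ [pvCtxRow line]) (R ++ [pvCtxRow line])
termination_by xs _ _ => xs.length
decreasing_by
  · simp
  · have h1 : (pvCollect "delete" (line :: rest)).2.length ≤ rest.length :=
      pvCollect_cons_le "delete" line rest h
    have h2 := pvCollect_rest_le "add" (pvCollect "delete" (line :: rest)).2
    simp only [List.length_cons]
    omega
  · simp
  · simp

def prepare_side_by_side_diff_py (diff_content : List (List (String × String))) :
    (List (List (String × String))) × (List (List (String × String))) :=
  pvLoopA diff_content [] []

-- ===== PORT B =====
-- segment descriptors: ('pair', dels, adds) or ('single', type, line)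
inductive PvSeg where
  | pair : List (List (String × String)) → List (List (String × String)) → PvSeg
  | single : String → List (String × String) → PvSeg
deriving DecidableEq, Repr

-- first pass: group the diff into segments (slices via takeWhile/dropWhile)
def pvSegments : List (List (String × String)) → List PvSeg
  | [] => []
  | line :: rest =>
    if h : pvType line == "delete" then
      let db := (line :: rest).takeWhile (fun l => pvType l == "delete")
      let r1 := (line :: rest).dropWhile (fun l => pvType l == "delete")
      let ab := r1.takeWhile (fun l => pvType l == "add")
      let r2 := r1.dropWhile (fun l => pvType l == "add")
      PvSeg.pair db ab :: pvSegments r2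
    else
      PvSeg.single (pvType line) line :: pvSegments rest
termination_by xs => xs.length
decreasing_by
  · have h1 : (line :: rest).dropWhile (fun l => pvType l == "delete") = rest.dropWhile (fun l => pvType l == "delete") := by
      simp [h]
    have h2 := List.length_dropWhile_le (fun l => pvType l == "delete") rest
    have h3 := List.length_dropWhile_le (fun l => pvType l == "add") ((line :: rest).dropWhile (fun l => pvType l == "delete"))
    have h4 : ((line :: rest).dropWhile (fun l => pvType l == "delete")).length ≤ rest.length := by
      rw [h1]; exact h2
    simp only [List.length_cons]
    omega
  · simp

-- second pass: render one segment onto the (left, right) accumulators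
def pvRender (acc : List (List (String × String)) × List (List (String × String)))
    (s : PvSeg) : List (List (String × String)) × List (List (String × String)) :=
  match s with
  | .pair db ab =>
    let pad := max db.length ab.length
    (acc.1 ++ db ++ List.replicate (pad - db.length) pvEmptyRow,
     acc.2 ++ ab ++ List.replicate (pad - ab.length) pvEmptyRow)
  | .single t line =>
    if t == "hunk" then (acc.1 ++ [line], acc.2 ++ [line])
    else if t == "add" then (acc.1 ++ [pvEmptyRow], acc.2 ++ [line])
    else (acc.1 ++ [pvCtxRow line], acc.2 ++ [pvCtxRow line])

def prepare_side_by_side_diff_py_alt (diff_content : List (List (String × String))) :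
    (List (List (String × String))) × (List (List (String × String))) :=
  (pvSegments diff_content).foldl pvRender ([], [])

-- ===== PRECONDITION & SPEC =====
-- Pre_: exactly the inputs where Python A returns (line['type'] raises KeyError when a line has no 'type' key)
def Pre_prepare_side_by_side_diff_py (diff_content : List (List (String × String))) : Prop :=
  ∀ line ∈ diff_content, (List.lookup "type" line).isSome = true
instance (diff_content : List (List (String × String))) : Decidable (Pre_prepare_side_by_side_diff_py diff_content) := by unfold Pre_prepare_side_by_side_diff_py; infer_instance

def pvWitness_prepare_side_by_side_diff_py : List (List (String × String)) :=
  [[("type", "hunk"), ("content", "@@ -1 +1 @@")],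
   [("type", "delete"), ("content", "old")],
   [("type", "add"), ("content", "new")],
   [("type", "context"), ("content", "same")]]

def Spec_prepare_side_by_side_diff_py (diff_content : List (List (String × String))) (out : (List (List (String × String))) × (List (List (String × String)))) : Prop := out = prepare_side_by_side_diff_py_alt diff_content
instance (diff_content : List (List (String × String))) (out : (List (List (String × String))) × (List (List (String × String)))) : Decidable (Spec_prepare_side_by_side_diff_py diff_content out) := by unfold Spec_prepare_side_by_side_diff_py; infer_instance

-- ===== CLAIM (what is proved, stated in full; the proofs are below) =====
def Claim_equal_prepare_side_by_side_diff_py : Prop := ∀ (diff_content : List (List (String × String))), Dom_prepare_side_by_side_diff_py diff_content → Pre_prepare_side_by_side_diff_py diff_content → Spec_prepare_side_by_side_diff_py diff_content (prepare_side_by_side_diff_py diff_content)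

-- ===== LEMMAS AND PROOFS =====

-- A's inner collector IS take/drop of the suffix
theorem pvCollect_eq (t : String) (xs : List (List (String × String))) :
    pvCollect t xs = (xs.takeWhile (fun l => pvType l == t), xs.dropWhile (fun l => pvType l == t)) := by
  induction xs with
  | nil => simp [pvCollect]
  | cons l ls ih =>
    simp only [pvCollect]
    by_cases h : pvType l == t
    · simp [h, ih]
    · simp [h]

-- A's pairing j-loop equals B's 'block ++ padding'
theorem pvStep (l L : List (List (String × String))) (m : Nat) :
    (if m < l.length then (L ++ l.take m ++ List.replicate (m - l.length) pvEmptyRow) ++ [l.getD m []]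
     else (L ++ l.take m ++ List.replicate (m - l.length) pvEmptyRow) ++ [pvEmptyRow])
    = L ++ l.take (m + 1) ++ List.replicate (m + 1 - l.length) pvEmptyRow := by
  by_cases hd : m < l.length
  · have e1 : m - l.length = 0 := by omega
    have e2 : m + 1 - l.length = 0 := by omega
    rw [if_pos hd, e1, e2, List.take_add_one, List.getElem?_eq_getElem hd]
    simp [List.getD, List.getElem?_eq_getElem hd]
  · have e1 : l.take m = l := List.take_of_length_le (by omega)
    have e2 : l.take (m + 1) = l := List.take_of_length_le (by omega)
    have e3 : m + 1 - l.length = (m - l.length) + 1 := by omega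
    rw [if_neg hd, e1, e2, e3, List.replicate_succ']
    simp

-- A's pairing j-loop equals B's 'block ++ padding'
theorem pvPairLoop_eq (db ab L R : List (List (String × String))) :
    pvPairLoop db ab L R =
      (L ++ db ++ List.replicate (max db.length ab.length - db.length) pvEmptyRow,
       R ++ ab ++ List.replicate (max db.length ab.length - ab.length) pvEmptyRow) := by
  have key : ∀ m, (List.range m).foldl
      (fun acc j =>
        ((if j < db.length then acc.1 ++ [db.getD j []] else acc.1 ++ [pvEmptyRow]),
         (if j < ab.length then acc.2 ++ [ab.getD j []] else acc.2 ++ [pvEmptyRow])))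
      (L, R) =
      (L ++ db.take m ++ List.replicate (m - db.length) pvEmptyRow,
       R ++ ab.take m ++ List.replicate (m - ab.length) pvEmptyRow) := by
    intro m
    induction m with
    | zero => simp
    | succ m ih =>
      rw [List.range_succ, List.foldl_append, ih]
      simp only [List.foldl_cons, List.foldl_nil]
      rw [Prod.mk.injEq]
      exact ⟨pvStep db L m, pvStep ab R m⟩
  rw [pvPairLoop, key]
  rw [List.take_of_length_le (Nat.le_max_left db.length ab.length),
      List.take_of_length_le (Nat.le_max_right db.length ab.length)]

-- the single loop of A equals segmentation followed by rendering
theorem pvLoopA_eq_render (n : ℕ) : ∀ (xs L R : List (List (String × String))), xs.length ≤ n →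
    pvLoopA xs L R = (pvSegments xs).foldl pvRender (L, R) := by
  induction n with
  | zero =>
    intro xs L R h
    have : xs = [] := List.eq_nil_of_length_eq_zero (Nat.le_zero.mp h)
    subst this
    simp [pvLoopA, pvSegments]
  | succ n ih =>
    intro xs L R h
    match xs with
    | [] => simp [pvLoopA, pvSegments]
    | line :: rest =>
      simp only [List.length_cons, Nat.succ_le_succ_iff] at h
      by_cases hdel : (pvType line == "delete") = true
      · have hhunk : (pvType line == "hunk") = false := by
          have := eq_of_beq hdel
          simp [this]
        have h2 := List.length_dropWhile_le (fun l => pvType l == "delete") rest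
        have h3 := List.length_dropWhile_le (fun l => pvType l == "add") ((line :: rest).dropWhile (fun l => pvType l == "delete"))
        have h1 : (line :: rest).dropWhile (fun l => pvType l == "delete") = rest.dropWhile (fun l => pvType l == "delete") := by
          simp [hdel]
        rw [h1] at h3
        rw [pvLoopA, pvSegments]
        simp only [hhunk, hdel, Bool.false_eq_true, if_false, dif_pos, List.foldl_cons,
          pvCollect_eq, pvPairLoop_eq, pvRender]
        rw [h1, ih _ _ _ (by omega)]
      · by_cases hhunk : (pvType line == "hunk") = true
        · rw [pvLoopA, pvSegments]
          simp only [hhunk, hdel, Bool.false_eq_true, if_true, dif_neg, not_false_iff,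
            List.foldl_cons, pvRender]
          exact ih _ _ _ h
        · by_cases hadd : (pvType line == "add") = true
          · rw [pvLoopA, pvSegments]
            simp only [hhunk, hdel, hadd, Bool.false_eq_true, if_true, if_false, dif_neg,
              not_false_iff, List.foldl_cons, pvRender]
            exact ih _ _ _ h
          · rw [pvLoopA, pvSegments]
            simp only [hhunk, hdel, hadd, Bool.false_eq_true, if_false, dif_neg,
              not_false_iff, List.foldl_cons, pvRender]
            exact ih _ _ _ h

-- ===== VERDICT (by name: the statement is the Claim_ definition above) =====
theorem prepare_side_by_side_diff_py_spec : Claim_equal_prepare_side_by_side_diff_py := by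
  intro dc _ _
  unfold Spec_prepare_side_by_side_diff_py prepare_side_by_side_diff_py prepare_side_by_side_diff_py_alt
  exact pvLoopA_eq_render dc.length dc [] [] le_rfl
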